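-- pv_equiv track=rewrite | github.com/afzalsiddique/problem-solving | Problem_Solving_Python/codility/ThreeLetters.py | helper
-- ===== SOURCE A (Python) =====
-- def helper(a, cntA, b, cntB):
--     if cntB>cntA:
--         return helper(b, cntB, a, cntA)
--     if not cntB:
--         return a*cntA
--     res=[]
--     while cntA>cntB and cntA>=2 and cntB>=1:
--         res.append(a)
--         res.append(a)
--         res.append(b)
--         cntA-=2
--         cntB-=1
--     while cntA and cntB and cntA==cntB:
--         res.append(a)
--         res.append(b)
--         cntA-=1
--         cntB-=1
--     if not cntA and not cntB:
--         return ''.join(res)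
--     return ''.join(res)+helper(a,cntA,b,cntB)
-- ===== SOURCE B (Python) =====
-- def helper(a, cntA, b, cntB):
--     if cntB > cntA:
--         a, cntA, b, cntB = b, cntB, a, cntA
--     if cntB == 0:
--         return a * cntA
--     d = cntA - cntB
--     if d <= cntB:
--         return (a + a + b) * d + (a + b) * (cntB - d)
--     return (a + a + b) * cntB + a * (cntA - 2 * cntB)
-- ===== Notes on version B (the rewrite author's own statement) =====
-- stated objective: simpler
-- what changed: Replaced the two while-loops plus two recursive calls by a single closed-form expression built with string multiplication: after the swap, (a+a+b)*d + (a+b)*(cntB-d) when d = cntA-cntB <= cntB, else (a+a+b)*cntB + a*(cntA-2*cntB).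
import Mathlib
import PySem

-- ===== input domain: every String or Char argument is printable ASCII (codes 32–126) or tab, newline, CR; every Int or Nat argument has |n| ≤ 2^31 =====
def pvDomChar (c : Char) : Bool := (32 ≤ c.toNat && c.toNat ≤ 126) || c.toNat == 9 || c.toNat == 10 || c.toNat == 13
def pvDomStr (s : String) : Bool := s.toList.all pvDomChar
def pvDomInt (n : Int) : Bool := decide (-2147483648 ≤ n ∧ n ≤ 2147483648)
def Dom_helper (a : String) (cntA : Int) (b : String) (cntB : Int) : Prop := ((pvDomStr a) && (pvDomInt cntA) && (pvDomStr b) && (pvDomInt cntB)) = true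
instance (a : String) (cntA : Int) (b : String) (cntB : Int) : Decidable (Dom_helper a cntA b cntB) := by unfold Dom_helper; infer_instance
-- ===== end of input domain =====

-- B replaces A's two while-loops plus tail recursion by one closed-form expression
-- built from string multiplication (objective: simpler).

-- ===== PORT A =====
-- first while loop: res.append(a);res.append(a);res.append(b); cntA-=2; cntB-=1
-- (res is kept flattened to List Char: ''.join distributes over append)
def helperLoop1 (a b : List Char) (res : List Char) (cA cB : Int) : List Char × Int × Int :=
  if h : cA > cB ∧ cA ≥ 2 ∧ cB ≥ 1 then
    helperLoop1 a b (res ++ a ++ a ++ b) (cA - 2) (cB - 1)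
  else (res, cA, cB)
  termination_by cB.toNat
  decreasing_by omega

-- second while loop: res.append(a);res.append(b); cntA-=1; cntB-=1.
-- Fuel makes it total: it is called with fuel cA.toNat, enough for every run on
-- which the Python loop terminates (it diverges when cA = cB < 0).
def helperLoop2 : Nat → List Char → List Char → List Char → Int → Int → List Char × Int × Int
  | 0, _, _, res, cA, cB => (res, cA, cB)
  | f + 1, a, b, res, cA, cB =>
    if cA ≠ 0 ∧ cB ≠ 0 ∧ cA = cB then
      helperLoop2 f a b (res ++ a ++ b) (cA - 1) (cB - 1)
    else (res, cA, cB)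

-- the recursive function body; fuel 3 covers every terminating run of the Python
-- (one possible swap call, the main body, one tail call that returns at `a*cntA`);
-- the Python recursion diverges otherwise.
def helperGo : Nat → List Char → Int → List Char → Int → List Char
  | 0, _, _, _, _ => []
  | f + 1, a, cA, b, cB =>
    if cB > cA then helperGo f b cB a cA
    else if cB = 0 then PySem.List.pyRepeat a cA
    else
      let s1 := helperLoop1 a b [] cA cB
      let s2 := helperLoop2 s1.2.1.toNat a b s1.1 s1.2.1 s1.2.2
      if s2.2.1 = 0 ∧ s2.2.2 = 0 then s2.1
      else s2.1 ++ helperGo f a s2.2.1 b s2.2.2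

def helper (a : String) (cntA : Int) (b : String) (cntB : Int) : String :=
  String.ofList (helperGo 3 a.toList cntA b.toList cntB)

-- ===== PORT B =====
def helperAltBody (a : List Char) (cA : Int) (b : List Char) (cB : Int) : List Char :=
  if cB = 0 then PySem.List.pyRepeat a cA
  else
    let d := cA - cB
    if d ≤ cB then
      PySem.List.pyRepeat (a ++ a ++ b) d ++ PySem.List.pyRepeat (a ++ b) (cB - d)
    else
      PySem.List.pyRepeat (a ++ a ++ b) cB ++ PySem.List.pyRepeat a (cA - 2 * cB)

def helper_alt (a : String) (cntA : Int) (b : String) (cntB : Int) : String :=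
  String.ofList
    (if cntB > cntA then helperAltBody b.toList cntB a.toList cntA
     else helperAltBody a.toList cntA b.toList cntB)

-- ===== PRECONDITION & SPEC =====
-- Pre_ excludes negative counts, on which A never returns (an infinite while loop
-- when the counts are equal and negative, unbounded same-argument recursion otherwise).
def Pre_helper (a : String) (cntA : Int) (b : String) (cntB : Int) : Prop :=
  0 ≤ cntA ∧ 0 ≤ cntB
instance (a : String) (cntA : Int) (b : String) (cntB : Int) : Decidable (Pre_helper a cntA b cntB) := by unfold Pre_helper; infer_instance

def pvWitness_helper : String × Int × String × Int := ("a", 7, "b", 3)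

def Spec_helper (a : String) (cntA : Int) (b : String) (cntB : Int) (out : String) : Prop := out = helper_alt a cntA b cntB
instance (a : String) (cntA : Int) (b : String) (cntB : Int) (out : String) : Decidable (Spec_helper a cntA b cntB out) := by unfold Spec_helper; infer_instance

-- ===== CLAIM (what is proved, stated in full; the proofs are below) =====
def Claim_equal_helper : Prop := ∀ (a : String) (cntA : Int) (b : String) (cntB : Int), Dom_helper a cntA b cntB → Pre_helper a cntA b cntB → Spec_helper a cntA b cntB (helper a cntA b cntB)

-- ===== LEMMAS AND PROOFS =====

theorem pyRepeat_eq_flatten {α : Type} (xs : List α) (n : Int) :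
    PySem.List.pyRepeat xs n = (List.replicate n.toNat xs).flatten := by
  simp [PySem.List.pyRepeat]

theorem pyRepeat_nonpos {α : Type} (xs : List α) {n : Int} (h : n ≤ 0) :
    PySem.List.pyRepeat xs n = [] := by
  rw [pyRepeat_eq_flatten]
  have : n.toNat = 0 := by omega
  simp [this]

theorem pyRepeat_pred {α : Type} (xs : List α) {n : Int} (h : 1 ≤ n) :
    PySem.List.pyRepeat xs n = xs ++ PySem.List.pyRepeat xs (n - 1) := by
  rw [pyRepeat_eq_flatten, pyRepeat_eq_flatten]
  have : n.toNat = (n - 1).toNat + 1 := by omega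
  rw [this, List.replicate_succ, List.flatten_cons]

theorem loop1_spec (a b : List Char) :
    ∀ (n : Nat) (cA cB : Int) (res : List Char), cB.toNat = n → 0 ≤ cB → cB ≤ cA →
      helperLoop1 a b res cA cB =
        (res ++ PySem.List.pyRepeat (a ++ a ++ b) (min (cA - cB) cB),
         cA - 2 * min (cA - cB) cB, cB - min (cA - cB) cB) := by
  intro n
  induction n with
  | zero =>
    intro cA cB res hn h0 hle
    have hcB : cB = 0 := by omega
    rw [helperLoop1]
    have hmin : min (cA - cB) cB = 0 := by omega
    rw [dif_neg (by omega : ¬(cA > cB ∧ cA ≥ 2 ∧ cB ≥ 1))]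
    simp [hmin, pyRepeat_nonpos _ (le_refl (0:Int))]
  | succ m ih =>
    intro cA cB res hn h0 hle
    rw [helperLoop1]
    by_cases hg : cA > cB ∧ cA ≥ 2 ∧ cB ≥ 1
    · rw [dif_pos hg]
      rw [ih (cA - 2) (cB - 1) (res ++ a ++ a ++ b) (by omega) (by omega) (by omega)]
      have hmin : min (cA - 2 - (cB - 1)) (cB - 1) = min (cA - cB) cB - 1 := by omega
      rw [hmin]
      rw [pyRepeat_pred (a ++ a ++ b) (by omega : (1:Int) ≤ min (cA - cB) cB)]
      simp only [Prod.mk.injEq, List.append_assoc]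
      refine ⟨by simp, by omega, by omega⟩
    · rw [dif_neg hg]
      have hmin : min (cA - cB) cB = 0 := by omega
      simp [hmin, pyRepeat_nonpos _ (le_refl (0:Int))]

theorem loop2_zero (a b : List Char) :
    ∀ (f : Nat) (res : List Char) (cA : Int), helperLoop2 f a b res cA 0 = (res, cA, 0) := by
  intro f res cA
  cases f with
  | zero => rfl
  | succ m => rw [helperLoop2]; rw [if_neg (by simp)]

theorem loop2_spec (a b : List Char) :
    ∀ (n : Nat) (c : Int) (res : List Char), c.toNat = n → 0 ≤ c →
      helperLoop2 c.toNat a b res c c = (res ++ PySem.List.pyRepeat (a ++ b) c, 0, 0) := by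
  intro n
  induction n with
  | zero =>
    intro c res hn h0
    have hc : c = 0 := by omega
    subst hc
    simp [helperLoop2, pyRepeat_nonpos _ (le_refl (0:Int))]
  | succ m ih =>
    intro c res hn h0
    rw [hn, helperLoop2]
    rw [if_pos ⟨by omega, by omega, rfl⟩]
    have hm : (c - 1).toNat = m := by omega
    have := ih (c - 1) (res ++ a ++ b) hm (by omega)
    rw [hm] at this
    rw [this]
    rw [pyRepeat_pred (a ++ b) (by omega : (1:Int) ≤ c)]
    simp [List.append_assoc]

-- the core: for 0 ≤ cB ≤ cA the body of A equals B's closed form, any fuel ≥ 2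
theorem go_eq_altBody (a b : List Char) (f : Nat) :
    ∀ (cA cB : Int), 0 ≤ cB → cB ≤ cA →
      helperGo (f + 2) a cA b cB = helperAltBody a cA b cB := by
  intro cA cB h0 hle
  rw [helperGo, helperAltBody]
  rw [if_neg (by omega)]
  by_cases hB : cB = 0
  · rw [if_pos hB, if_pos hB]
  · rw [if_neg hB, if_neg hB]
    have h1 : (1:Int) ≤ cB := by omega
    rw [loop1_spec a b cB.toNat cA cB [] rfl h0 hle]
    by_cases hd : cA - cB ≤ cB
    · -- loop1 drains the surplus, loop2 drains the rest, both counters hit 0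
      have hmin : min (cA - cB) cB = cA - cB := by omega
      rw [if_pos hd]
      simp only [hmin]
      have hc : cA - 2 * (cA - cB) = cB - (cA - cB) := by ring
      rw [hc]
      rw [loop2_spec a b (cB - (cA - cB)).toNat (cB - (cA - cB)) _ rfl (by omega)]
      simp
    · -- loop1 exhausts cB, the tail recursion returns a * remaining cA
      have hmin : min (cA - cB) cB = cB := by omega
      rw [if_neg hd]
      simp only [hmin]
      have hz : cB - cB = 0 := by ring
      rw [hz, loop2_zero a b]
      dsimp only
      have hpos : cA - 2 * cB ≠ 0 := by omega
      rw [if_neg (by simp [hpos])]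
      rw [helperGo]
      rw [if_neg (by omega), if_pos rfl]
      simp

-- ===== VERDICT (by name: the statement is the Claim_ definition above) =====
theorem helper_spec : Claim_equal_helper := by
  intro a cntA b cntB _hDom hPre
  obtain ⟨hA, hB⟩ := hPre
  unfold Spec_helper helper helper_alt
  by_cases hswap : cntB > cntA
  · rw [if_pos hswap]
    show String.ofList (helperGo (2 + 1) a.toList cntA b.toList cntB) = _
    rw [helperGo, if_pos hswap]
    rw [show (2:Nat) = 0 + 2 from rfl, go_eq_altBody b.toList a.toList 0 cntB cntA hA (by omega)]
  · rw [if_neg hswap]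
    rw [show (3:Nat) = 1 + 2 from rfl, go_eq_altBody a.toList b.toList 1 cntA cntB hB (by omega)]
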